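-- pv_equiv track=rewrite | github.com/smorawetz/Tensorflow-VQA | modified_HelperFunctionsandDataGeneration.py | ImportantXSites
-- ===== SOURCE A (Python) =====
-- def ImportantXSites(N):
--     """
--     Purpose:
--       - Generates the list of important lattice sites in order to compute the X syndrome later on.
--
--     Arguments:
--       - N (odd integer): The number of qubits along one side of the square lattice.
--
--     Output:
--       - BoundaryListX (list): A list of important sites along the boundary of the lattice.
--       - BulkListX (list): A list of important sites in the bulk of the lattice.
--       - FullListX (list): BoundaryListX + BulkListX, sorted numerically.
--     """
--
--     BoundaryP = (N - 1) // 2  # Number of boundary plaquettes per side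
--     BulkP = (N - 1) ** 2  # Number of bulk plaquettes
--
--     BoundaryListX = []
--     BulkListX = []
--
--     # The following loop creates a list of the important spins in the bulk for the RNN.
--
--     for i in range(N, N ** 2):  # Skips the first row to generate the important sites.
--         if (i % 2 == 0) and (i % N != 0):
--             BulkListX.append(i)
--
--     # The next loop does the same, but for the boundaries.
--
--     for i in range(BoundaryP):
--         BoundaryListX.append(2 * N * (i + 1) - 1)  # The right boundary
--         BoundaryListX.append(2 * N * (i + 1))  # The left boundary
--
--     # Sort the boundary lists so we can locate which plaquette we're on
--
--     BoundaryListX.sort()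
--
--     FullListX = BoundaryListX + BulkListX
--     FullListX.sort()
--
--     return BoundaryListX, BulkListX, FullListX
-- ===== SOURCE B (Python) =====
-- def ImportantXSites(N):
--     # Row/stride construction: emit each bulk site directly instead of
--     # filtering the whole flat range; boundary list is built already sorted.
--     BulkListX = []
--     for r in range(1, N):
--         base = r * N
--         start = 1 if base % 2 == 1 else 2  # first c in 1..N-1 with base+c even
--         for c in range(start, N, 2):
--             BulkListX.append(base + c)
--     BoundaryListX = []
--     for i in range(1, (N - 1) // 2 + 1):
--         BoundaryListX.append(2 * N * i - 1)
--         BoundaryListX.append(2 * N * i)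
--     FullListX = BoundaryListX + BulkListX
--     FullListX.sort()
--     return BoundaryListX, BulkListX, FullListX
-- ===== Notes on version B (the rewrite author's own statement) =====
-- stated objective: alternative
-- what changed: BulkListX is built by a nested row/stride construction (for each row r, start at the first even offset derived from the parity of r*N and step by 2) instead of filtering the flat range(N, N**2) with i%2/i%N tests, and BoundaryListX is emitted directly in ascending order so the boundary .sort() disappears.
-- outside the precondition, e.g. on ImportantXSites(-3): A returns ([], [-2, 2, 4, 8], [-2, 2, 4, 8]), B returns ([], [], [])
import Mathlib
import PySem

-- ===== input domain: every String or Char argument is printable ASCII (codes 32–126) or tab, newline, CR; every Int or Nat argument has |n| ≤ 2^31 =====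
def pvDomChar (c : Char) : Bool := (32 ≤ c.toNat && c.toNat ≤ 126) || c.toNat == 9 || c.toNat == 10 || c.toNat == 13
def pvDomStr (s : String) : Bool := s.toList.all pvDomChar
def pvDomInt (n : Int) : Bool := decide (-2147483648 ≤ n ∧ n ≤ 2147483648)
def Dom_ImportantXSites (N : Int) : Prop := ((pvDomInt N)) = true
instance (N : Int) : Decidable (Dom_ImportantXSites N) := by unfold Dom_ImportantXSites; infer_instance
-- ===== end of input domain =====

-- B builds the bulk list row by row with a stride-2 inner range (no per-element mod tests)
-- and emits the boundary list already sorted; objective: alternative decomposition.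

-- ===== PORT A =====
def ImportantXSites (N : Int) : List Int × List Int × List Int :=
  let bulk : List Int := (PySem.List.pyRange N (N ^ 2) 1).foldl
      (fun acc i => if PySem.Int.mod i 2 = 0 ∧ PySem.Int.mod i N ≠ 0 then acc ++ [i] else acc) []
  let boundaryP : Int := PySem.Int.floordiv (N - 1) 2
  let boundary : List Int := (PySem.List.pyRange 0 boundaryP 1).foldl
      (fun acc i => (acc ++ [2 * N * (i + 1) - 1]) ++ [2 * N * (i + 1)]) []
  let boundarySorted : List Int := PySem.List.sorted boundary (fun x => x)
  let full : List Int := PySem.List.sorted (boundarySorted ++ bulk) (fun x => x)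
  (boundarySorted, bulk, full)

-- ===== PORT B =====
def ImportantXSites_alt (N : Int) : List Int × List Int × List Int :=
  let bulk : List Int := (PySem.List.pyRange 1 N 1).foldl
      (fun acc r =>
        let base := r * N
        let start : Int := if PySem.Int.mod base 2 = 1 then 1 else 2
        (PySem.List.pyRange start N 2).foldl (fun acc2 c => acc2 ++ [base + c]) acc) []
  let boundary : List Int := (PySem.List.pyRange 1 (PySem.Int.floordiv (N - 1) 2 + 1) 1).foldl
      (fun acc i => (acc ++ [2 * N * i - 1]) ++ [2 * N * i]) []
  let full : List Int := PySem.List.sorted (boundary ++ bulk) (fun x => x)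
  (boundary, bulk, full)

-- ===== PRECONDITION & SPEC =====
-- Pre_ restricts to nonnegative N, the lattice side-length domain; for negative N the flat
-- range(N, N**2) scan of A emits negative "sites", an artefact outside the lattice domain,
-- which B's row construction (naturally empty there) does not reproduce.
def Pre_ImportantXSites (N : Int) : Prop := 0 ≤ N
instance (N : Int) : Decidable (Pre_ImportantXSites N) := by unfold Pre_ImportantXSites; infer_instance
def pvWitness_ImportantXSites : Int := 5
def Spec_ImportantXSites (N : Int) (out : List Int × List Int × List Int) : Prop := out = ImportantXSites_alt N
instance (N : Int) (out : List Int × List Int × List Int) : Decidable (Spec_ImportantXSites N out) := by unfold Spec_ImportantXSites; infer_instance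

-- ===== CLAIM (what is proved, stated in full; the proofs are below) =====
def Claim_equal_ImportantXSites : Prop := ∀ (N : Int), Dom_ImportantXSites N → Pre_ImportantXSites N → Spec_ImportantXSites N (ImportantXSites N)

-- ===== LEMMAS AND PROOFS =====

-- inner start offset used by B's row construction
def pvStart (N r : Int) : Int := if PySem.Int.mod (r * N) 2 = 1 then 1 else 2

-- two strictly increasing integer lists with the same members coincide
lemma pv_lt_ext (l₁ l₂ : List Int) (h₁ : l₁.Pairwise (· < ·)) (h₂ : l₂.Pairwise (· < ·))
    (hm : ∀ x, x ∈ l₁ ↔ x ∈ l₂) : l₁ = l₂ := by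
  have n₁ : l₁.Nodup := h₁.imp (fun h => ne_of_lt h)
  have n₂ : l₂.Nodup := h₂.imp (fun h => ne_of_lt h)
  exact List.eq_of_perm_of_sorted
    (fun a b _ _ hab hba => absurd hba (lt_asymm hab)) h₁ h₂
    ((List.perm_ext_iff_of_nodup n₁ n₂).mpr hm)

lemma pv_pairwise_pyRange_two (a b : Int) : (PySem.List.pyRange a b 2).Pairwise (· < ·) := by
  rw [PySem.List.pyRange_of_pos a b (by norm_num)]
  rw [List.pairwise_map]
  exact (List.pairwise_lt_range).imp (by intro k₁ k₂ h; omega)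

-- A's bulk fold is the filtered flat range
lemma pv_bulkA (N : Int) :
    (PySem.List.pyRange N (N ^ 2) 1).foldl
      (fun acc i => if PySem.Int.mod i 2 = 0 ∧ PySem.Int.mod i N ≠ 0 then acc ++ [i] else acc) []
    = (PySem.List.pyRange N (N ^ 2) 1).filter
        (fun i => decide (PySem.Int.mod i 2 = 0 ∧ PySem.Int.mod i N ≠ 0)) := by
  simpa using PySem.List.foldl_append_ite_eq_filter
    (fun i => PySem.Int.mod i 2 = 0 ∧ PySem.Int.mod i N ≠ 0) (PySem.List.pyRange N (N ^ 2) 1) []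

-- B's bulk fold is a flatMap of row blocks
lemma pv_bulkB (N : Int) :
    (PySem.List.pyRange 1 N 1).foldl
      (fun acc r =>
        let base := r * N
        let start : Int := if PySem.Int.mod base 2 = 1 then 1 else 2
        (PySem.List.pyRange start N 2).foldl (fun acc2 c => acc2 ++ [base + c]) acc) []
    = (PySem.List.pyRange 1 N 1).flatMap
        (fun r => (PySem.List.pyRange (pvStart N r) N 2).map (fun c => r * N + c)) := by
  have hbody : (fun (acc : List Int) (r : Int) =>
      let base := r * N
      let start : Int := if PySem.Int.mod base 2 = 1 then 1 else 2
      (PySem.List.pyRange start N 2).foldl (fun acc2 c => acc2 ++ [base + c]) acc)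
    = fun (acc : List Int) (r : Int) =>
        acc ++ (PySem.List.pyRange (pvStart N r) N 2).map (fun c => r * N + c) := by
    funext acc r
    show (PySem.List.pyRange (pvStart N r) N 2).foldl
        (fun acc2 c => acc2 ++ [r * N + c]) acc = _
    exact PySem.List.foldl_append_singleton_eq_map (fun c => r * N + c) _ acc
  rw [hbody]
  simpa using PySem.List.foldl_append_eq_flatMap
    (fun r => (PySem.List.pyRange (pvStart N r) N 2).map (fun c => r * N + c))
    (PySem.List.pyRange 1 N 1) []

-- the block of row r sits strictly inside (r*N, r*N + N)
lemma pv_mem_block (N r x : Int) :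
    x ∈ (PySem.List.pyRange (pvStart N r) N 2).map (fun c => r * N + c) ↔
      ∃ c, pvStart N r ≤ c ∧ c < N ∧ (2 : Int) ∣ c - pvStart N r ∧ x = r * N + c := by
  simp only [List.mem_map, PySem.List.mem_pyRange_iff_of_pos (by norm_num : (0:Int) < 2)]
  constructor
  · rintro ⟨c, ⟨h1, h2, h3⟩, rfl⟩; exact ⟨c, h1, h2, h3, rfl⟩
  · rintro ⟨c, h1, h2, h3, rfl⟩; exact ⟨c, ⟨h1, h2, h3⟩, rfl⟩

lemma pv_start_parity (N r : Int) : 1 ≤ pvStart N r ∧ pvStart N r ≤ 2 ∧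
    (2 : Int) ∣ (r * N + pvStart N r) := by
  have h' := PySem.Int.mod_eq_emod_of_pos (a := r * N) (by norm_num : (0:Int) < 2)
  rcases PySem.Int.mod_two_eq (r * N) with h | h <;> simp only [pvStart, h] <;> norm_num <;>
    rw [h] at h' <;> omega

-- membership characterisation of the bulk lists
lemma pv_mem_bulk (N : Int) (hN : 1 ≤ N) (x : Int) :
    (N ≤ x ∧ x < N ^ 2 ∧ (PySem.Int.mod x 2 = 0 ∧ PySem.Int.mod x N ≠ 0)) ↔
    ∃ r, (1 ≤ r ∧ r < N) ∧
      x ∈ (PySem.List.pyRange (pvStart N r) N 2).map (fun c => r * N + c) := by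
  constructor
  · rintro ⟨hxN, hxN2, hev, hmodN⟩
    rw [PySem.Int.mod_eq_emod_of_pos (by norm_num : (0:Int) < 2)] at hev
    rw [PySem.Int.mod_eq_emod_of_pos (by omega : (0:Int) < N)] at hmodN
    have hc0 : 0 ≤ x % N := Int.emod_nonneg x (by omega)
    have hcN : x % N < N := Int.emod_lt_of_pos x (by omega)
    have hx : N * (x / N) + x % N = x := Int.ediv_add_emod x N
    have hr1 : 1 ≤ x / N := by
      rw [Int.le_ediv_iff_mul_le (by omega : (0:Int) < N)]; omega
    have hNN : x < N * N := by rw [pow_two] at hxN2; exact hxN2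
    have hrN : x / N < N := by
      refine lt_of_mul_lt_mul_left ?_ (by omega : (0:Int) ≤ N)
      omega
    refine ⟨x / N, ⟨hr1, hrN⟩, ?_⟩
    rw [pv_mem_block]
    obtain ⟨hs1, hs2, hsp⟩ := pv_start_parity N (x / N)
    have hbx : (x / N) * N + x % N = x := by rw [mul_comm]; exact hx
    refine ⟨x % N, ?_, hcN, ?_, ?_⟩ <;>
      (generalize hB : (x / N) * N = base at hbx hsp;
       generalize hS : pvStart N (x / N) = s at hs1 hs2 hsp;
       generalize hC : x % N = c at hbx hc0 hcN hmodN) <;> omega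
  · rintro ⟨r, ⟨hr1, hrN⟩, hmem⟩
    rw [pv_mem_block] at hmem
    obtain ⟨c, hsc, hcN, hpar, rfl⟩ := hmem
    obtain ⟨hs1, hs2, hsp⟩ := pv_start_parity N r
    have h1 : 1 * N ≤ r * N := mul_le_mul_of_nonneg_right hr1 (by omega)
    have h2 : (r + 1) * N ≤ N * N := mul_le_mul_of_nonneg_right (by omega) (by omega)
    have h3 : (r + 1) * N = r * N + N := by ring
    have h4 : 1 * N = N := one_mul N
    refine ⟨by omega, ?_, ?_, ?_⟩
    · rw [pow_two]; omega
    · rw [PySem.Int.mod_eq_emod_of_pos (by norm_num : (0:Int) < 2)]; omega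
    · rw [PySem.Int.mod_eq_emod_of_pos (by omega : (0:Int) < N)]
      have h5 : (r * N + c) % N = c % N := by
        rw [show r * N + c = c + N * r by ring, Int.add_mul_emod_self_left]
      rw [h5, Int.emod_eq_of_lt (by omega) hcN]
      omega

lemma pv_bulk_eq (N : Int) (hN : 1 ≤ N) :
    (PySem.List.pyRange N (N ^ 2) 1).filter
        (fun i => decide (PySem.Int.mod i 2 = 0 ∧ PySem.Int.mod i N ≠ 0))
    = (PySem.List.pyRange 1 N 1).flatMap
        (fun r => (PySem.List.pyRange (pvStart N r) N 2).map (fun c => r * N + c)) := by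
  apply pv_lt_ext
  · exact (PySem.List.pairwise_lt_pyRange_one _ _).filter _
  · rw [List.pairwise_flatMap]
    constructor
    · intro r _
      rw [List.pairwise_map]
      exact (pv_pairwise_pyRange_two _ _).imp (by intro a b h; omega)
    · refine (PySem.List.pairwise_lt_pyRange_one 1 N).imp_of_mem ?_
      intro r s hr hs hrs x hx y hy
      rw [PySem.List.mem_pyRange_one] at hr hs
      rw [pv_mem_block] at hx hy
      obtain ⟨c, hc1, hc2, -, rfl⟩ := hx
      obtain ⟨c', hc'1, -, -, rfl⟩ := hy
      obtain ⟨hs1, -, -⟩ := pv_start_parity N r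
      obtain ⟨hs'1, -, -⟩ := pv_start_parity N s
      have h1 : (r + 1) * N ≤ s * N := mul_le_mul_of_nonneg_right (by omega) (by omega)
      have h2 : (r + 1) * N = r * N + N := by ring
      omega
  · intro x
    have h := pv_mem_bulk N hN x
    simp only [List.mem_filter, PySem.List.mem_pyRange_one, decide_eq_true_eq,
      List.mem_flatMap] at *
    rw [and_assoc]
    exact h

-- A's boundary fold equals B's boundary fold as raw lists
lemma pv_boundary_raw (N : Int) (P : Int) :
    (PySem.List.pyRange 0 P 1).foldl
      (fun acc i => (acc ++ [2 * N * (i + 1) - 1]) ++ [2 * N * (i + 1)]) []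
    = (PySem.List.pyRange 1 (P + 1) 1).foldl
      (fun acc i => (acc ++ [2 * N * i - 1]) ++ [2 * N * i]) [] := by
  simp only [List.append_assoc, List.singleton_append]
  rw [PySem.List.foldl_append_eq_flatMap (fun i => [2 * N * (i + 1) - 1, 2 * N * (i + 1)]),
    PySem.List.foldl_append_eq_flatMap (fun i => [2 * N * i - 1, 2 * N * i])]
  simp only [List.nil_append]
  rw [PySem.List.pyRange_one 0 P, PySem.List.pyRange_one 1 (P + 1), List.flatMap_map,
    List.flatMap_map]
  have hlen : (P - 0).toNat = (P + 1 - 1).toNat := by omega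
  rw [hlen]
  have harg : ∀ k : Nat, (0:Int) + (k:Int) + 1 = 1 + (k:Int) := fun k => by ring
  simp only [harg]

lemma pv_boundary_pairwise (N : Int) (hN : 1 ≤ N) (P : Int) :
    ((PySem.List.pyRange 1 (P + 1) 1).foldl
      (fun acc i => (acc ++ [2 * N * i - 1]) ++ [2 * N * i]) []).Pairwise (· < ·) := by
  simp only [List.append_assoc, List.singleton_append]
  rw [PySem.List.foldl_append_eq_flatMap (fun i => [2 * N * i - 1, 2 * N * i])]
  simp only [List.nil_append]
  rw [List.pairwise_flatMap]
  constructor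
  · intro i _
    constructor
    · intro y hy
      simp only [List.mem_singleton] at hy
      omega
    · simp
  · refine (PySem.List.pairwise_lt_pyRange_one 1 (P + 1)).imp_of_mem ?_
    intro i j hi hj hij x hx y hy
    rw [PySem.List.mem_pyRange_one] at hi hj
    simp only [List.mem_cons, List.not_mem_nil, or_false] at hx hy
    have h1 : 2 * N * (i + 1) ≤ 2 * N * j := by
      have := mul_le_mul_of_nonneg_left (by omega : i + 1 ≤ j) (by omega : (0:Int) ≤ 2 * N)
      linarith
    have h2 : 2 * N * (i + 1) = 2 * N * i + 2 * N := by ring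
    rcases hx with rfl | rfl <;> rcases hy with rfl | rfl <;> omega

-- ===== VERDICT (by name: the statement is the Claim_ definition above) =====
theorem ImportantXSites_spec : Claim_equal_ImportantXSites := by
  intro N hDom hPre
  unfold Spec_ImportantXSites
  by_cases h0 : N = 0
  · subst h0; decide
  · have hN : 1 ≤ N := by unfold Pre_ImportantXSites at hPre; omega
    show ImportantXSites N = ImportantXSites_alt N
    simp only [ImportantXSites, ImportantXSites_alt]
    rw [pv_bulkA, pv_bulkB, pv_bulk_eq N hN,
      pv_boundary_raw N (PySem.Int.floordiv (N - 1) 2),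
      PySem.List.sorted_eq_of_perm_of_pairwise_lt _ _ _ (List.Perm.refl _)
        (pv_boundary_pairwise N hN (PySem.Int.floordiv (N - 1) 2))]
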